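-- pv_equiv track=rewrite | github.com/chasewoodard93/nornflow-netops | enhancements/network_tasks/discovery/discovery_tasks.py | _parse_inventory_output
-- ===== SOURCE A (Python) =====
-- from typing import Any, Dict, List, Optional, Union
--
-- def _parse_inventory_output(output: str, platform: str) -> List[Dict[str, Any]]:
--     """Parse inventory output manually."""
--     inventory = []
--     # Basic parsing logic - would need to be expanded for production use
--     lines = output.split('\n')
--
--     for line in lines:
--         if 'PID:' in line or 'SN:' in line:
--             item = {}
--             parts = line.split()
--             for part in parts:
--                 if part.startswith('PID:'):
--                     item["pid"] = part.split(':')[1] if ':' in part else ""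
--                 elif part.startswith('SN:'):
--                     item["serial"] = part.split(':')[1] if ':' in part else ""
--             if item:
--                 inventory.append(item)
--
--     return inventory
-- ===== SOURCE B (Python) =====
-- def _parse_inventory_output(output, platform):
--     """Parse inventory output with a single character-level scan: a token-buffer
--     state machine; no split() calls, no intermediate line/token lists."""
--     inventory = []
--     item = {}
--     tok = ''
--     for c in output + '\n':
--         if c.isspace():
--             if tok.startswith('PID:'):
--                 v = tok[4:]
--                 j = v.find(':')
--                 item['pid'] = v if j < 0 else v[:j]
--             elif tok.startswith('SN:'):
--                 v = tok[3:]
--                 j = v.find(':')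
--                 item['serial'] = v if j < 0 else v[:j]
--             tok = ''
--             if c == '\n':
--                 if item:
--                     inventory.append(item)
--                 item = {}
--         else:
--             tok += c
--     return inventory
-- ===== Notes on version B (the rewrite author's own statement) =====
-- stated objective: alternative
-- what changed: Replaces A's two-level split pipeline (split('\n') into lines, str.split() into tokens, split(':') inside each token, plus a redundant 'PID:'/'SN:' substring pre-filter) by a single character-level scan: a token-buffer state machine that classifies each token at its whitespace boundary and flushes the line's item at each newline, building no intermediate line or token lists.
import Mathlib
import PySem

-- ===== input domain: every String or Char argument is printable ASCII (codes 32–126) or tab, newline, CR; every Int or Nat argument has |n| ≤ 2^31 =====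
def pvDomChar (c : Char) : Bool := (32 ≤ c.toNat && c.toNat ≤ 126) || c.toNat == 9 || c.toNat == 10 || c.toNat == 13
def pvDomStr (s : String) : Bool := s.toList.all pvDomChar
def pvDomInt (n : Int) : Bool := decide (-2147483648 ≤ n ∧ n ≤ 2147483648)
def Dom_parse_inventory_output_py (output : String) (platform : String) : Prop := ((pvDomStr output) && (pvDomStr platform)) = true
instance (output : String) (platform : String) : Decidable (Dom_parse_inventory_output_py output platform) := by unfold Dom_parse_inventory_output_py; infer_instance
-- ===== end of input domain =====

-- B replaces A's two-level split machinery (split('\n') into lines, str.split() into tokens,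
-- split(':') inside each token) by a single character-level scan: a token-buffer state machine
-- that classifies each token at its whitespace boundary and flushes the item at each newline
-- (objective: alternative — one pass over the characters, no intermediate line/token lists).

-- ===== PORT A =====
-- body of A's inner 'for part in parts' loop; the index [1] is guarded by the ':' in part test,
-- so the pyGetD default is never the value Python's [1] would have raised on.
def pvAStep (item : PySem.Dict String String) (part : List Char) : PySem.Dict String String :=
  if PySem.Chars.startswith part ['P','I','D',':'] then
    item.insert "pid" (if PySem.Chars.isIn [':'] part then String.ofList (PySem.List.pyGetD (PySem.Chars.splitOn part [':']) 1 []) else "")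
  else if PySem.Chars.startswith part ['S','N',':'] then
    item.insert "serial" (if PySem.Chars.isIn [':'] part then String.ofList (PySem.List.pyGetD (PySem.Chars.splitOn part [':']) 1 []) else "")
  else item

-- body of A's outer 'for line in lines' loop
def pvALineStep (inventory : List (List (String × String))) (line : List Char) : List (List (String × String)) :=
  if PySem.Chars.isIn ['P','I','D',':'] line || PySem.Chars.isIn ['S','N',':'] line then
    let item := (PySem.Chars.split₀ line).foldl pvAStep PySem.Dict.empty
    if item.size ≠ 0 then inventory ++ [item.items] else inventory
  else inventory

-- strings are handled on the .toList side (PySem.Str.* are thin wrappers over PySem.Chars.*);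
-- output.split('\n') = Chars.splitOn (sep non-empty, so split? = some of exactly this).
def parse_inventory_output_py (output : String) (platform : String) : List (List (String × String)) :=
  (PySem.Chars.splitOn output.toList ['\n']).foldl pvALineStep []

-- ===== PORT B =====
-- Source B's token classification at a token boundary: v.find(':') is Chars.find; v[:j] with
-- 0 ≤ j ≤ len v (always the case when j = find ≥ 0) is List.take j.toNat — exact there.
def pvBClassify (item : PySem.Dict String String) (tok : List Char) : PySem.Dict String String :=
  if PySem.Chars.startswith tok ['P','I','D',':'] then
    let v := tok.drop 4
    let j := PySem.Chars.find v [':']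
    item.insert "pid" (String.ofList (if j < 0 then v else v.take j.toNat))
  else if PySem.Chars.startswith tok ['S','N',':'] then
    let v := tok.drop 3
    let j := PySem.Chars.find v [':']
    item.insert "serial" (String.ofList (if j < 0 then v else v.take j.toNat))
  else item

-- Source B's loop body: one character of the scan; state = (inventory, item, token buffer)
def pvBStep (st : List (List (String × String)) × PySem.Dict String String × List Char)
    (c : Char) : List (List (String × String)) × PySem.Dict String String × List Char :=
  let (inv, item, tok) := st
  if PySem.Chars.isspace c then
    let item := pvBClassify item tok
    if c == '\n' then
      ((if item.size ≠ 0 then inv ++ [item.items] else inv), PySem.Dict.empty, [])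
    else (inv, item, [])
  else (inv, item, tok ++ [c])

-- 'for c in output + "\n"' over the scanner state; the result is the inventory component
def parse_inventory_output_py_alt (output : String) (platform : String) : List (List (String × String)) :=
  ((output.toList ++ ['\n']).foldl pvBStep ([], PySem.Dict.empty, [])).1

-- ===== PRECONDITION & SPEC =====
def Spec_parse_inventory_output_py (output : String) (platform : String) (out : List (List (String × String))) : Prop := out = parse_inventory_output_py_alt output platform
instance (output : String) (platform : String) (out : List (List (String × String))) : Decidable (Spec_parse_inventory_output_py output platform out) := by unfold Spec_parse_inventory_output_py; infer_instance

-- ===== CLAIM (what is proved, stated in full; the proofs are below) =====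
def Claim_equal_parse_inventory_output_py : Prop := ∀ (output : String) (platform : String), Dom_parse_inventory_output_py output platform → Spec_parse_inventory_output_py output platform (parse_inventory_output_py output platform)

-- ===== LEMMAS AND PROOFS =====

-- appending an item if the dict is non-empty (shared shape of both programs' flush sites)
def pvFlush (inv : List (List (String × String))) (d : PySem.Dict String String) : List (List (String × String)) :=
  if d.size ≠ 0 then inv ++ [d.items] else inv

-- the common per-line semantics both programs are reduced to
def pvLineB (inv : List (List (String × String))) (line : List Char) : List (List (String × String)) :=
  pvFlush inv ((PySem.Chars.split₀ line).foldl pvBClassify PySem.Dict.empty)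

-- ---- Chars.splitOn with a single-character separator is Mathlib's List.splitOnP ----

lemma pv_splitOn_go (ch : Char) : ∀ (fuel : Nat) (l cur : List Char) (acc : List (List Char)),
    l.length < fuel →
    PySem.Chars.splitOn.go [ch] fuel l cur acc
      = acc.reverse ++ (l.splitOnP (· == ch)).modifyHead (cur.reverse ++ ·) := by
  intro fuel
  induction fuel with
  | zero => intro l cur acc h; omega
  | succ f ih =>
    intro l cur acc h
    match l with
    | [] => simp [PySem.Chars.splitOn.go, List.splitOnP_nil]
    | c :: rest =>
      by_cases hc : c = ch
      · have hp : [ch].isPrefixOf (c :: rest) = true := by simp [List.isPrefixOf, hc]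
        rw [show PySem.Chars.splitOn.go [ch] (f+1) (c :: rest) cur acc
              = PySem.Chars.splitOn.go [ch] f (List.drop 1 (c :: rest)) [] (cur.reverse :: acc) by
            simp [PySem.Chars.splitOn.go, hp]]
        rw [ih _ _ _ (by simpa using Nat.lt_of_succ_lt_succ h)]
        simp only [List.splitOnP_cons, hc, beq_self_eq_true, ite_true, List.modifyHead]
        cases hr : rest.splitOnP (· == ch) with
        | nil => exact absurd hr (List.splitOnP_ne_nil _ _)
        | cons x xs => simp [hr]
      · have hp : [ch].isPrefixOf (c :: rest) = false := by
          simp [List.isPrefixOf]; exact fun hh => hc hh.symm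
        rw [show PySem.Chars.splitOn.go [ch] (f+1) (c :: rest) cur acc
              = PySem.Chars.splitOn.go [ch] f rest (c :: cur) acc by
            simp [PySem.Chars.splitOn.go, hp]]
        rw [ih _ _ _ (by simpa using Nat.lt_of_succ_lt_succ h)]
        rw [List.splitOnP_cons]
        simp only [show (c == ch) = false by simp [hc], if_neg (by simp : ¬ false = true)]
        rw [List.modifyHead_modifyHead]
        congr 1
        cases hr : rest.splitOnP (· == ch) with
        | nil => exact absurd hr (List.splitOnP_ne_nil _ _)
        | cons x xs => simp [List.modifyHead, Function.comp]

lemma pv_splitOn_eq (ch : Char) (l : List Char) :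
    PySem.Chars.splitOn l [ch] = l.splitOnP (· == ch) := by
  unfold PySem.Chars.splitOn
  rw [pv_splitOn_go ch (l.length + 1) l [] [] (by omega)]
  cases h : l.splitOnP (· == ch) with
  | nil => exact absurd h (List.splitOnP_ne_nil _ _)
  | cons x xs => simp [List.modifyHead]

-- ---- split₀ structure lemmas ----

lemma pv_go_acc : ∀ (l cur : List Char) (acc : List (List Char)),
    PySem.Chars.split₀.go l cur acc = acc.reverse ++ PySem.Chars.split₀.go l cur [] := by
  intro l
  induction l with
  | nil =>
    intro cur acc
    by_cases hc : cur.isEmpty <;> simp [PySem.Chars.split₀.go, hc]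
  | cons c rest ih =>
    intro cur acc
    by_cases hs : PySem.Chars.isspace c
    · by_cases hc : cur.isEmpty
      · simp only [PySem.Chars.split₀.go, hs, hc, ite_true]
        exact ih [] acc
      · simp only [PySem.Chars.split₀.go, hs, hc, ite_true, ite_false, Bool.false_eq_true]
        rw [ih [] (cur.reverse :: acc), ih [] [cur.reverse]]
        simp
    · simp only [PySem.Chars.split₀.go, hs, Bool.false_eq_true, ite_false]
      exact ih (c :: cur) acc

lemma pv_go_tok : ∀ (tok : List Char), (∀ a ∈ tok, PySem.Chars.isspace a = false) →
    ∀ (rest cur : List Char) (acc : List (List Char)),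
    PySem.Chars.split₀.go (tok ++ rest) cur acc = PySem.Chars.split₀.go rest (tok.reverse ++ cur) acc := by
  intro tok
  induction tok with
  | nil => intro _ rest cur acc; simp
  | cons c t ih =>
    intro h rest cur acc
    have hc : PySem.Chars.isspace c = false := h c (by simp)
    simp only [List.cons_append, PySem.Chars.split₀.go, hc, Bool.false_eq_true, ite_false]
    rw [ih (fun a ha => h a (by simp [ha])) rest (c :: cur) acc]
    congr 1
    simp

-- an empty token contributes nothing (it starts with neither prefix)
lemma pv_class_nil (item : PySem.Dict String String) : pvBClassify item [] = item := by
  simp [pvBClassify, PySem.Chars.startswith, List.isPrefixOf]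

-- a pure (whitespace-free) token splits to itself
lemma pv_split₀_of_tok (tok : List Char) (h : ∀ a ∈ tok, PySem.Chars.isspace a = false) :
    PySem.Chars.split₀ tok = if tok.isEmpty then [] else [tok] := by
  unfold PySem.Chars.split₀
  rw [show tok = tok ++ [] by simp, pv_go_tok tok h [] [] []]
  simp [PySem.Chars.split₀.go]

-- folding the classification over a pure token's pieces is one classification step
lemma pv_split₀_tok (tok : List Char) (h : ∀ a ∈ tok, PySem.Chars.isspace a = false)
    (item : PySem.Dict String String) :
    (PySem.Chars.split₀ tok).foldl pvBClassify item = pvBClassify item tok := by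
  rw [pv_split₀_of_tok tok h]
  cases tok with
  | nil => simp [pv_class_nil]
  | cons c t => simp

-- peeling a whitespace-terminated token off the front of a line
lemma pv_split₀_peel (tok : List Char) (h : ∀ a ∈ tok, PySem.Chars.isspace a = false)
    (c : Char) (hc : PySem.Chars.isspace c = true) (l : List Char) :
    PySem.Chars.split₀ (tok ++ c :: l)
      = (if tok.isEmpty then [] else [tok]) ++ PySem.Chars.split₀ l := by
  unfold PySem.Chars.split₀
  rw [pv_go_tok tok h (c :: l) [] []]
  cases tok with
  | nil => simp [PySem.Chars.split₀.go, hc]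
  | cons a t =>
    simp only [PySem.Chars.split₀.go, hc, ite_true, List.append_nil]
    rw [if_neg (by simp)]
    rw [pv_go_acc l [] [List.reverse (List.reverse (a :: t))]]
    simp

-- ---- both value extractions compute takeWhile (· != ':') of the token's remainder ----

lemma pv_take_eq_takeWhile (p : Char → Bool) : ∀ (v : List Char) (n : Nat),
    (∀ i, i < n → ∀ (hl : i < v.length), p v[i] = true) →
    (∀ (hl : n < v.length), p v[n] = false) →
    n ≤ v.length →
    v.takeWhile p = v.take n := by
  intro v
  induction v with
  | nil => intro n _ _ h; simp
  | cons a w ih =>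
    intro n h1 h2 hn
    cases n with
    | zero =>
      have h0 : p a = false := h2 (by simp)
      simp [h0]
    | succ m =>
      have ha : p a = true := h1 0 (by omega) (by simp)
      simp only [List.takeWhile_cons, ha, ite_true, List.take_succ_cons]
      congr 1
      exact ih m (fun i hi hl => h1 (i+1) (by omega) (by simpa using Nat.succ_lt_succ hl))
        (fun hl => h2 (by simpa using Nat.succ_lt_succ hl)) (by simpa using hn)

-- B's find-and-slice = takeWhile
lemma pv_find_take (v : List Char) :
    (if PySem.Chars.find v [':'] < 0 then v else v.take (PySem.Chars.find v [':']).toNat)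
      = v.takeWhile (· != ':') := by
  by_cases hin : [':'] <:+: v
  · have h0 : 0 ≤ PySem.Chars.find v [':'] := (PySem.Chars.find_nonneg_iff v [':']).2 hin
    rw [if_neg (by omega)]
    obtain ⟨hpre, hmin⟩ := PySem.Chars.find_spec (s := v) (sub := [':']) h0
    set n := (PySem.Chars.find v [':']).toNat with hn
    rcases hpre with ⟨t, ht⟩
    have hnlt : n < v.length := by
      have hlen := congrArg List.length ht
      have := List.length_drop (l := v) (i := n)
      simp at hlen
      omega
    have hvn : v[n] = ':' := by
      have h9 := congrArg (fun l : List Char => l[0]?) ht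
      simp only [List.getElem?_drop, Nat.add_zero] at h9
      have := List.getElem?_eq_getElem (l := v) (i := n) hnlt
      rw [this] at h9
      simpa using h9.symm
    refine (pv_take_eq_takeWhile _ v n ?_ ?_ (by omega)).symm
    · intro i hi hl
      simp only [bne_iff_ne, ne_eq]
      intro hix
      exact hmin i hi ⟨List.drop (i+1) v, by rw [← hix]; exact (List.getElem_cons_drop hl).symm ▸ rfl⟩
    · intro hl
      simp [hvn]
  · rw [if_pos]
    · symm
      refine List.takeWhile_eq_self_iff.2 ?_
      intro a ha
      simp only [bne_iff_ne, ne_eq]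
      intro hax
      exact hin ((List.singleton_infix_iff ':' v).2 (hax ▸ ha))
    · have := (PySem.Chars.find_eq_neg_one_iff v [':']).2 hin
      omega

-- A's split(':')[1] = takeWhile of what follows the prefix's colon
lemma pv_splitOnP_head (ch : Char) : ∀ (v : List Char),
    ∃ rest, v.splitOnP (· == ch) = v.takeWhile (· != ch) :: rest := by
  intro v
  induction v with
  | nil => exact ⟨[], by simp⟩
  | cons a w ih =>
    by_cases ha : a = ch
    · exact ⟨w.splitOnP (· == ch), by simp [List.splitOnP_cons, ha]⟩
    · rcases ih with ⟨rest, hr⟩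
      refine ⟨rest, ?_⟩
      rw [List.splitOnP_cons]
      rw [if_neg (by simp [ha])]
      rw [hr]
      simp [List.modifyHead, ha]

lemma pv_splitOnP_pfx (v : List Char) : ∀ (q : List Char), (':' : Char) ∉ q →
    (q ++ ':' :: v).splitOnP (· == ':') = q :: v.splitOnP (· == ':') := by
  intro q
  induction q with
  | nil => intro _; simp [List.splitOnP_cons]
  | cons a t ih =>
    intro hq
    have ha : a ≠ ':' := fun h => hq (by simp [h])
    rw [List.cons_append, List.splitOnP_cons, if_neg (by simp [ha]),
      ih (fun h => hq (by simp [h]))]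
    simp [List.modifyHead]

-- the value a prefixed token contributes: A's extraction = B's extraction
lemma pv_value_eq (q v tok : List Char) (hq : (':' : Char) ∉ q)
    (htok : tok = q ++ ':' :: v) :
    (if PySem.Chars.isIn [':'] tok then String.ofList (PySem.List.pyGetD (PySem.Chars.splitOn tok [':']) 1 []) else "")
      = String.ofList (if PySem.Chars.find v [':'] < 0 then v else v.take (PySem.Chars.find v [':']).toNat) := by
  have hin : PySem.Chars.isIn [':'] tok = true := by
    rw [PySem.Chars.isIn_iff_infix]
    exact (List.singleton_infix_iff ':' tok).2 (by simp [htok])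
  rw [if_pos hin, pv_splitOn_eq, htok, pv_splitOnP_pfx v q hq, pv_find_take]
  obtain ⟨rest, hr⟩ := pv_splitOnP_head ':' v
  rw [hr]
  simp [PySem.List.pyGetD, PySem.List.pyGet?, PySem.List.pyIdx?]

-- A's token step = B's classification
lemma pv_class_eq (item : PySem.Dict String String) (tok : List Char) :
    pvAStep item tok = pvBClassify item tok := by
  unfold pvAStep pvBClassify
  by_cases hP : PySem.Chars.startswith tok ['P','I','D',':'] = true
  · obtain ⟨v, hv⟩ := (PySem.Chars.startswith_iff tok _).1 hP
    rw [if_pos hP, if_pos hP]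
    rw [pv_value_eq ['P','I','D'] v tok (by decide) (by rw [← hv]; rfl)]
    have : tok.drop 4 = v := by rw [← hv]; rfl
    rw [this]
  · by_cases hS : PySem.Chars.startswith tok ['S','N',':'] = true
    · obtain ⟨v, hv⟩ := (PySem.Chars.startswith_iff tok _).1 hS
      rw [if_neg hP, if_neg hP, if_pos hS, if_pos hS]
      rw [pv_value_eq ['S','N'] v tok (by decide) (by rw [← hv]; rfl)]
      have : tok.drop 3 = v := by rw [← hv]; rfl
      rw [this]
    · simp [hP, hS]

-- ---- guard redundancy on A's side ----

-- every piece produced by str.split() is a contiguous piece (infix) of the string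
lemma pv_go_mem (l : List Char) : ∀ cur acc t, t ∈ PySem.Chars.split₀.go l cur acc →
    t ∈ acc ∨ (∃ w, w <+: l ∧ t = cur.reverse ++ w) ∨ t <:+: l := by
  induction l with
  | nil =>
    intro cur acc t ht
    simp only [PySem.Chars.split₀.go] at ht
    split at ht
    · simp only [List.mem_reverse] at ht
      exact Or.inl ht
    · simp only [List.reverse_cons] at ht
      rcases List.mem_append.1 ht with h | h
      · exact Or.inl (by simpa using h)
      · simp only [List.mem_singleton] at h
        exact Or.inr (Or.inl ⟨[], List.nil_prefix, by simp [h]⟩)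
  | cons c rest ih =>
    intro cur acc t ht
    simp only [PySem.Chars.split₀.go] at ht
    split at ht
    · split at ht
      · rcases ih [] acc t ht with h | ⟨w, hw, hteq⟩ | h
        · exact Or.inl h
        · exact Or.inr (Or.inr (by
            simpa [hteq] using (List.infix_cons (hw.isInfix))))
        · exact Or.inr (Or.inr (List.infix_cons h))
      · rcases ih [] (cur.reverse :: acc) t ht with h | ⟨w, hw, hteq⟩ | h
        · rcases List.mem_cons.1 h with h | h
          · exact Or.inr (Or.inl ⟨[], List.nil_prefix, by simp [h]⟩)
          · exact Or.inl h
        · exact Or.inr (Or.inr (by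
            simpa [hteq] using (List.infix_cons (hw.isInfix))))
        · exact Or.inr (Or.inr (List.infix_cons h))
    · rcases ih (c :: cur) acc t ht with h | ⟨w, hw, hteq⟩ | h
      · exact Or.inl h
      · refine Or.inr (Or.inl ⟨c :: w, ?_, ?_⟩)
        · exact (List.cons_prefix_cons).2 ⟨rfl, hw⟩
        · simp [hteq]
      · exact Or.inr (Or.inr (List.infix_cons h))

lemma pv_mem_split₀_infix {l t : List Char} (h : t ∈ PySem.Chars.split₀ l) : t <:+: l := by
  rcases pv_go_mem l [] [] t h with h | ⟨w, hw, hteq⟩ | h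
  · simp at h
  · simpa [hteq] using hw.isInfix
  · exact h

-- A's line step = the common per-line semantics (the substring pre-filter is redundant)
lemma pv_line_eq (inv : List (List (String × String))) (line : List Char) :
    pvALineStep inv line = pvLineB inv line := by
  have hfa : pvAStep = pvBClassify := funext fun i => funext fun t => pv_class_eq i t
  unfold pvALineStep pvLineB pvFlush
  rw [hfa]
  by_cases hg : (PySem.Chars.isIn ['P','I','D',':'] line || PySem.Chars.isIn ['S','N',':'] line) = true
  · rw [if_pos hg]
  · rw [if_neg hg]
    simp only [Bool.or_eq_true, not_or, Bool.not_eq_true] at hg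
    have hz : (PySem.Chars.split₀ line).foldl pvBClassify PySem.Dict.empty = PySem.Dict.empty := by
      rw [PySem.List.foldl_congr_mem (PySem.Chars.split₀ line) pvBClassify (fun acc _ => acc) PySem.Dict.empty ?_]
      · exact List.foldl_fixed _
      · intro acc t ht
        have hinf := pv_mem_split₀_infix ht
        have h1 : PySem.Chars.startswith t ['P','I','D',':'] = false := by
          by_contra h
          have h' := (PySem.Chars.startswith_iff t _).1 (by simpa using h)
          have : PySem.Chars.isIn ['P','I','D',':'] line = true :=
            (PySem.Chars.isIn_iff_infix _ _).2 (h'.isInfix.trans hinf)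
          exact absurd this (by simp [hg.1])
        have h2 : PySem.Chars.startswith t ['S','N',':'] = false := by
          by_contra h
          have h' := (PySem.Chars.startswith_iff t _).1 (by simpa using h)
          have : PySem.Chars.isIn ['S','N',':'] line = true :=
            (PySem.Chars.isIn_iff_infix _ _).2 (h'.isInfix.trans hinf)
          exact absurd this (by simp [hg.2])
        simp [pvBClassify, h1, h2]
    rw [hz]
    simp [PySem.Dict.empty, PySem.Dict.size]

-- ---- the scanner processes the input line by line ----

lemma pv_fold_pfx (tok : List Char) (item : PySem.Dict String String) :
    ((if tok.isEmpty then [] else [tok]) : List (List Char)).foldl pvBClassify item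
      = pvBClassify item tok := by
  cases tok with
  | nil => simp [pv_class_nil]
  | cons a t => simp

lemma pv_scan (s : List Char) : ∀ (inv : List (List (String × String)))
    (item : PySem.Dict String String) (tok : List Char),
    (∀ a ∈ tok, PySem.Chars.isspace a = false) →
    ((s ++ ['\n']).foldl pvBStep (inv, item, tok)).1
      = ((s.splitOnP (· == '\n')).tail).foldl pvLineB
          (pvFlush inv ((PySem.Chars.split₀ (tok ++ (s.splitOnP (· == '\n')).headI)).foldl pvBClassify item)) := by
  induction s with
  | nil =>
    intro inv item tok h
    show (pvBStep (inv, item, tok) '\n').1 = _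
    simp only [pvBStep, show PySem.Chars.isspace '\n' = true by decide, ite_true,
      show ('\n' == '\n') = true by decide, List.splitOnP_nil, List.tail, List.headI,
      List.foldl_nil, List.append_nil]
    rw [pv_split₀_tok tok h item]
    rfl
  | cons c s' ih =>
    intro inv item tok h
    obtain ⟨hd', tl', hsp'⟩ : ∃ hd tl, s'.splitOnP (· == '\n') = hd :: tl := by
      cases hx : s'.splitOnP (· == '\n') with
      | nil => exact absurd hx (List.splitOnP_ne_nil _ _)
      | cons a b => exact ⟨a, b, rfl⟩
    by_cases hc : c = '\n'
    · subst hc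
      have step : pvBStep (inv, item, tok) '\n'
          = (pvFlush inv (pvBClassify item tok), PySem.Dict.empty, []) := by
        simp [pvBStep, pvFlush, show PySem.Chars.isspace '\n' = true by decide]
      rw [List.cons_append, List.foldl_cons, step,
        ih (pvFlush inv (pvBClassify item tok)) PySem.Dict.empty [] (by simp)]
      rw [List.splitOnP_cons, if_pos (by simp)]
      simp only [List.tail, List.headI, hsp', List.nil_append, List.append_nil, List.foldl_cons]
      rw [pv_split₀_tok tok h item]
      rfl
    · by_cases hs : PySem.Chars.isspace c = true
      · have step : pvBStep (inv, item, tok) c = (inv, pvBClassify item tok, []) := by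
          simp [pvBStep, hs, hc]
        rw [List.cons_append, List.foldl_cons, step,
          ih inv (pvBClassify item tok) [] (by simp)]
        rw [List.splitOnP_cons, if_neg (by simp [hc]), hsp']
        simp only [List.modifyHead, List.tail, List.headI, List.nil_append]
        rw [pv_split₀_peel tok h c hs hd', List.foldl_append, pv_fold_pfx tok item]
      · have step : pvBStep (inv, item, tok) c = (inv, item, tok ++ [c]) := by
          simp [pvBStep, hs]
        rw [List.cons_append, List.foldl_cons, step,
          ih inv item (tok ++ [c]) (by
            intro a ha
            rcases List.mem_append.1 ha with h1 | h1
            · exact h a h1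
            · simp only [List.mem_singleton] at h1
              subst h1
              simpa using hs)]
        rw [List.splitOnP_cons, if_neg (by simp [hc]), hsp']
        simp only [List.modifyHead, List.tail, List.headI]
        rw [List.append_assoc]
        rfl

-- ===== VERDICT (by name: the statement is the Claim_ definition above) =====
theorem parse_inventory_output_py_spec : Claim_equal_parse_inventory_output_py := by
  intro output platform _
  unfold Spec_parse_inventory_output_py parse_inventory_output_py parse_inventory_output_py_alt
  rw [pv_scan output.toList [] PySem.Dict.empty [] (by simp)]
  rw [pv_splitOn_eq]
  have hfa : pvALineStep = pvLineB := funext fun i => funext fun l => pv_line_eq i l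
  rw [hfa]
  obtain ⟨hd, tl, hsp⟩ : ∃ hd tl, output.toList.splitOnP (· == '\n') = hd :: tl := by
    cases hx : output.toList.splitOnP (· == '\n') with
    | nil => exact absurd hx (List.splitOnP_ne_nil _ _)
    | cons a b => exact ⟨a, b, rfl⟩
  rw [hsp]
  simp only [List.tail, List.headI, List.nil_append, List.foldl_cons]
  rfl
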